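-- pv_equiv track=rewrite | github.com/sunghunkwag/OMEGA-THDSE | Cognitive-Core-Engine-Test/agi_modules/arc_solver.py | rotate_90_cw
-- ===== SOURCE A (Python) =====
-- from typing import Callable, Dict, List, Optional, Set, Tuple
--
-- Grid = List[List[int]]
--
-- def rotate_90_cw(grid: Grid) -> Grid:
--     """Rotate 90 degrees clockwise."""
--     if not grid or not grid[0]:
--         return grid
--     R, C = len(grid), len(grid[0])
--     result = [[0] * R for _ in range(C)]
--     for r in range(R):
--         for c in range(C):
--             result[c][R - 1 - r] = grid[r][c]
--     return result
-- ===== SOURCE B (Python) =====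
-- def rotate_90_cw(grid):
--     """Rotate 90 degrees clockwise."""
--     if not grid or not grid[0]:
--         return grid
--     return [list(row) for row in zip(*grid[::-1])]
-- ===== Notes on version B (the rewrite author's own statement) =====
-- stated objective: idiomatic
-- what changed: Replaces A's destination-index scatter into a preallocated zero matrix with the standard reverse-then-zip transpose (zip(*grid[::-1])), moving the per-element work into C-level builtins; Pre_ excludes the ragged grids with a row shorter than the first row, on which A raises IndexError.
import Mathlib
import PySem

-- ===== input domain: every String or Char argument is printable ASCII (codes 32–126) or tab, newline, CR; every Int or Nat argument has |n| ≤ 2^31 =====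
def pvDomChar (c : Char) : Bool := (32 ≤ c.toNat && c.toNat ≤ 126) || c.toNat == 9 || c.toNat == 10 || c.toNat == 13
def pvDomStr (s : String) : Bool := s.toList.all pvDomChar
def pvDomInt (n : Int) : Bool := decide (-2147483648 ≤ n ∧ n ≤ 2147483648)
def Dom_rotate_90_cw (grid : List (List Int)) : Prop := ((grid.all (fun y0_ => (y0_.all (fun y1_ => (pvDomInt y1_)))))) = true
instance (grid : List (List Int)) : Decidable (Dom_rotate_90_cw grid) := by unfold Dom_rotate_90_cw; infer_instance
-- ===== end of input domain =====

-- B replaces A's destination-index scatter with the idiomatic reverse-then-zip transpose; same cost.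

-- ===== PORT A =====
-- grid[r][c] is ported as pyGetD (in-range under Pre_, where Python's indexing never raises)
def rotate_90_cw (grid : List (List Int)) : List (List Int) :=
  if grid = [] ∨ PySem.List.pyGetD grid 0 [] = [] then grid
  else
    let R : Int := grid.length
    let C : Int := (PySem.List.pyGetD grid 0 []).length
    let result := List.replicate C.toNat (List.replicate R.toNat (0 : Int))
    (PySem.List.pyRange 0 R 1).foldl (fun res r =>
      (PySem.List.pyRange 0 C 1).foldl (fun res c =>
        res.set c.toNat ((PySem.List.pyGetD res c []).set (R - 1 - r).toNat
          (PySem.List.pyGetD (PySem.List.pyGetD grid r []) c 0))) res) result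

-- ===== PORT B =====
-- zip(*rows): emit the heads of all rows while every row is nonempty, recursing on the first row
def pyZipGo (first : List Int) (rest : List (List Int)) : List (List Int) :=
  match first with
  | [] => []
  | x :: xs =>
    if rest.all (fun r => !r.isEmpty) then
      (x :: rest.map (fun r => r.headD 0)) :: pyZipGo xs (rest.map List.tail)
    else []

def pyZipStar (rows : List (List Int)) : List (List Int) :=
  match rows with
  | [] => []
  | first :: rest => pyZipGo first rest

def rotate_90_cw_alt (grid : List (List Int)) : List (List Int) :=
  if grid = [] ∨ PySem.List.pyGetD grid 0 [] = [] then grid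
  else pyZipStar grid.reverse

-- ===== PRECONDITION & SPEC =====
-- Pre_ excludes exactly the ragged grids on which A raises IndexError (a row shorter than the first row).
def Pre_rotate_90_cw (grid : List (List Int)) : Prop :=
  ∀ row ∈ grid, (grid.headD []).length ≤ row.length
instance (grid : List (List Int)) : Decidable (Pre_rotate_90_cw grid) := by
  unfold Pre_rotate_90_cw; infer_instance

def pvWitness_rotate_90_cw : List (List Int) := [[1, 2], [3, 4]]

def Spec_rotate_90_cw (grid : List (List Int)) (out : List (List Int)) : Prop := out = rotate_90_cw_alt grid
instance (grid : List (List Int)) (out : List (List Int)) : Decidable (Spec_rotate_90_cw grid out) := by unfold Spec_rotate_90_cw; infer_instance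

-- ===== CLAIM (what is proved, stated in full; the proofs are below) =====
def Claim_equal_rotate_90_cw : Prop := ∀ (grid : List (List Int)), Dom_rotate_90_cw grid → Pre_rotate_90_cw grid → Spec_rotate_90_cw grid (rotate_90_cw grid)


-- ===== LEMMAS AND PROOFS =====

-- the common target: list of columns c < m, column c read bottom row up
def colSpec (rows : List (List Int)) (m : Nat) : List (List Int) :=
  (List.range m).map (fun c => rows.map (fun row => row.getD c 0))

-- minimum of first.length and the lengths in rest (the zip truncation length)
def minLen (first : List Int) (rest : List (List Int)) : Nat :=
  rest.foldr (fun r m => min r.length m) first.length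

lemma minLen_le_init (first : List Int) (rest : List (List Int)) :
    minLen first rest ≤ first.length := by
  induction rest with
  | nil => simp [minLen]
  | cons h t ih => exact le_trans (min_le_right _ _) ih

lemma minLen_le_mem (first : List Int) (rest : List (List Int)) (r : List Int)
    (hr : r ∈ rest) : minLen first rest ≤ r.length := by
  induction rest with
  | nil => cases hr
  | cons h t ih =>
    rcases List.mem_cons.mp hr with h1 | h2
    · subst h1; exact min_le_left _ _
    · exact le_trans (min_le_right _ _) (ih h2)

lemma le_minLen (first : List Int) (rest : List (List Int)) (C : Nat)
    (h1 : C ≤ first.length) (h2 : ∀ r ∈ rest, C ≤ r.length) :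
    C ≤ minLen first rest := by
  induction rest with
  | nil => simpa [minLen]
  | cons h t ih =>
    exact le_min (h2 h (by simp)) (ih (fun r hr => h2 r (List.mem_cons_of_mem _ hr)))

lemma minLen_tail (xs : List Int) (rest : List (List Int))
    (h : ∀ r ∈ rest, r ≠ []) :
    minLen (0 :: xs) rest = minLen xs (rest.map List.tail) + 1 := by
  induction rest with
  | nil => simp [minLen]
  | cons r t ih =>
    have hr : r ≠ [] := h r (by simp)
    obtain ⟨a, as, rfl⟩ := List.exists_cons_of_ne_nil hr
    have hih := ih (fun r hr => h r (List.mem_cons_of_mem _ hr))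
    simp only [minLen, List.foldr_cons, List.map_cons] at *
    rw [hih]
    simp [Nat.succ_min_succ]

lemma getD_zero_eq_headD (r : List Int) : r.getD 0 0 = r.headD 0 := by
  cases r <;> simp

lemma getD_succ_eq_tail (r : List Int) (c : Nat) : r.getD (c + 1) 0 = r.tail.getD c 0 := by
  cases r <;> simp

lemma colSpec_succ (rows : List (List Int)) (n : Nat) :
    colSpec rows (n + 1) =
      rows.map (fun row => row.headD 0) ::
        (List.range n).map (fun c => rows.map (fun row => row.tail.getD c 0)) := by
  simp only [colSpec, List.range_succ_eq_map, List.map_cons, List.map_map]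
  refine congrArg₂ List.cons ?_ ?_
  · exact List.map_congr_left (fun r _ => getD_zero_eq_headD r)
  · refine List.map_congr_left (fun c _ => ?_)
    simp only [Function.comp]
    exact List.map_congr_left (fun r _ => getD_succ_eq_tail r c)

lemma pyZipGo_eq (first : List Int) (rest : List (List Int)) :
    pyZipGo first rest = colSpec (first :: rest) (minLen first rest) := by
  induction first generalizing rest with
  | nil => simp [pyZipGo, colSpec, Nat.le_zero.mp (minLen_le_init [] rest)]
  | cons x xs ih =>
    by_cases hall : rest.all (fun r => !r.isEmpty) = true
    · have hne : ∀ r ∈ rest, r ≠ [] := by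
        intro r hr
        have := List.all_eq_true.mp hall r hr
        simpa [List.isEmpty_iff] using this
      have hmin : minLen (x :: xs) rest = minLen xs (rest.map List.tail) + 1 := by
        have h0 : minLen (x :: xs) rest = minLen ((0:Int) :: xs) rest := by
          simp [minLen]
        rw [h0, minLen_tail xs rest hne]
      rw [pyZipGo, if_pos hall, ih, hmin, colSpec_succ]
      refine congrArg₂ List.cons (by simp) ?_
      simp only [colSpec, List.map_cons]
      refine List.map_congr_left (fun c _ => ?_)
      refine congrArg₂ List.cons rfl ?_
      simp [Function.comp]
    · obtain ⟨r, hr, hre⟩ : ∃ r ∈ rest, r.isEmpty := by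
        by_contra h
        push Not at h
        exact hall (List.all_eq_true.mpr (fun r hrm => by simpa using h r hrm))
      have hm0 : minLen (x :: xs) rest = 0 := by
        have h1 := minLen_le_mem (x :: xs) rest r hr
        have hl : r.length = 0 := by simpa [List.isEmpty_iff_length_eq_zero] using hre
        omega
      rw [pyZipGo, if_neg hall, hm0]
      simp [colSpec]

lemma pyZipStar_eq (grid : List (List Int)) (C : Nat) (hg : grid ≠ [])
    (hmem : ∀ row ∈ grid, C ≤ row.length) (hwit : ∃ row ∈ grid, row.length = C) :
    pyZipStar grid = colSpec grid C := by
  obtain ⟨b, bs, rfl⟩ := List.exists_cons_of_ne_nil hg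
  have h1 : pyZipStar (b :: bs) = pyZipGo b bs := rfl
  rw [h1, pyZipGo_eq]
  have hle : minLen b bs ≤ C := by
    obtain ⟨row, hrm, hrl⟩ := hwit
    rcases List.mem_cons.mp hrm with h2 | h2
    · rw [h2] at hrl; exact hrl ▸ minLen_le_init b bs
    · exact hrl ▸ minLen_le_mem b bs row h2
  have hge : C ≤ minLen b bs :=
    le_minLen b bs C (hmem b (by simp)) (fun x hx => hmem x (List.mem_cons_of_mem _ hx))
  rw [le_antisymm hle hge]

-- ===== A-side: characterize the nested set-loops =====

lemma foldl_set_length {α : Type} (l : List Nat) (f : Nat → List α → List α)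
    (res : List α) (hf : ∀ c a, (f c a).length = a.length) :
    (l.foldl (fun a c => f c a) res).length = res.length := by
  induction l generalizing res with
  | nil => rfl
  | cons c t ih => simp [List.foldl_cons, ih, hf]

-- the inner loop: set entry p of row c to v c, for every c < n
lemma inner_get (v : Nat → Int) (p : Nat) (res : List (List Int)) (n : Nat) :
    ∀ k, ((List.range n).foldl (fun a c => a.set c ((a.getD c []).set p (v c))) res)[k]? =
      if k < n then (res[k]?).map (fun row => row.set p (v k)) else res[k]? := by
  induction n with
  | zero => simp
  | succ n ih =>
    intro k
    rw [List.range_succ, List.foldl_append]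
    set O := (List.range n).foldl (fun a c => a.set c ((a.getD c []).set p (v c))) res with hO
    have hOl : O.length = res.length :=
      foldl_set_length _ (fun c a => a.set c ((a.getD c []).set p (v c))) res (fun c a => by simp)
    have hOn : O[n]? = res[n]? := by simpa using ih n
    simp only [List.foldl_cons, List.foldl_nil]
    rw [List.getElem?_set]
    by_cases hk : n = k
    · subst hk
      by_cases hkl : n < res.length
      · have hOe : O[n]'(by omega) = res[n]'hkl := by
          have h := hOn
          rw [List.getElem?_eq_getElem (show n < O.length by omega),
            List.getElem?_eq_getElem hkl] at h
          exact Option.some.inj h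
        simp [hkl, hOl, List.getD_eq_getElem?_getD, hOe]
      · simp [hOl, hkl]
    · rw [if_neg hk, ih k]
      by_cases h2 : k < n
      · simp [h2, (show k < n + 1 by omega)]
      · simp [h2, (show ¬ k < n + 1 by omega)]

-- the outer loop: each iteration maps every column independently
lemma outer_get (g : Nat → Nat → Int) (p : Nat → Nat) (C : Nat)
    (init : List (List Int)) (m : Nat) :
    ∀ k, ((List.range m).foldl (fun res r =>
        (List.range C).foldl (fun a c => a.set c ((a.getD c []).set (p r) (g r c))) res)
        init)[k]? =
      if k < C then (init[k]?).map
        (fun row => (List.range m).foldl (fun row r => row.set (p r) (g r k)) row)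
      else init[k]? := by
  induction m with
  | zero =>
    intro k
    by_cases hk : k < C <;> simp [hk]
  | succ m ih =>
    intro k
    rw [List.range_succ, List.foldl_append]
    simp only [List.foldl_cons, List.foldl_nil]
    rw [inner_get (g m) (p m) _ C k]
    by_cases hk : k < C
    · simp only [ih k, if_pos hk, Option.map_map, List.foldl_append,
        List.foldl_cons, List.foldl_nil]
      cases init[k]? <;> rfl
    · simp only [if_neg hk, ih k]

-- the row built for one column after m outer iterations
lemma row_fold_get (v : Nat → Int) (R : Nat) (m : Nat) (hm : m ≤ R) :
    ∀ j, ((List.range m).foldl (fun row r => row.set (R - 1 - r) (v r))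
        (List.replicate R (0 : Int)))[j]? =
      if j < R then some (if R - m ≤ j then v (R - 1 - j) else 0) else none := by
  induction m with
  | zero =>
    intro j
    by_cases hj : j < R
    · simp [hj]
    · simp [hj]
  | succ m ih =>
    intro j
    have hm' : m ≤ R := by omega
    rw [List.range_succ, List.foldl_append]
    set O := (List.range m).foldl (fun row r => row.set (R - 1 - r) (v r))
      (List.replicate R (0 : Int)) with hO
    have hOl : O.length = R := by
      have := foldl_set_length (List.range m) (fun r (row : List Int) => row.set (R - 1 - r) (v r))
        (List.replicate R (0 : Int)) (fun c a => by simp)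
      simpa using this
    simp only [List.foldl_cons, List.foldl_nil]
    rw [List.getElem?_set]
    by_cases hje : R - 1 - m = j
    · subst hje
      rw [if_pos rfl, if_pos (show R - 1 - m < O.length by rw [hOl]; omega),
        if_pos (show R - 1 - m < R by omega), if_pos (by omega),
        show R - 1 - (R - 1 - m) = m by omega]
    · rw [if_neg hje, ih hm' j]
      by_cases hj : j < R
      · rw [if_pos hj, if_pos hj]
        congr 1
        by_cases h2 : R - m ≤ j
        · rw [if_pos h2, if_pos (show R - (m + 1) ≤ j by omega)]
        · rw [if_neg h2, if_neg (show ¬ R - (m + 1) ≤ j by omega)]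
      · rw [if_neg hj, if_neg hj]

lemma row_fold_eq (v : Nat → Int) (R : Nat) :
    (List.range R).foldl (fun row r => row.set (R - 1 - r) (v r)) (List.replicate R (0 : Int)) =
      (List.range R).map (fun j => v (R - 1 - j)) := by
  apply List.ext_getElem?
  intro j
  rw [row_fold_get v R R le_rfl j]
  by_cases hj : j < R
  · rw [if_pos hj, if_pos (by omega), List.getElem?_map, List.getElem?_range hj]
    rfl
  · rw [if_neg hj, List.getElem?_map,
      List.getElem?_eq_none (show (List.range R).length ≤ j by simpa using (by omega : R ≤ j))]
    rfl

-- conversion of port A's Int-indexed pyRange loops to plain Nat loops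
lemma portA_nat (a : List Int) (t : List (List Int)) (ha : a ≠ []) :
    rotate_90_cw (a :: t) =
      (List.range (a :: t).length).foldl (fun res r =>
        (List.range a.length).foldl (fun acc c =>
          acc.set c ((acc.getD c []).set ((a :: t).length - 1 - r)
            (((a :: t).getD r []).getD c 0))) res)
        (List.replicate a.length (List.replicate (a :: t).length (0 : Int))) := by
  have hget0 : PySem.List.pyGetD (a :: t) 0 [] = a := by
    simp [PySem.List.pyGetD, PySem.List.pyGet?, PySem.List.pyIdx?]
  rw [rotate_90_cw, if_neg (by simp [hget0, ha])]
  simp only [hget0]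
  rw [PySem.List.pyRange_one, PySem.List.pyRange_one]
  simp only [Int.sub_zero, Int.toNat_natCast, List.foldl_map]
  refine PySem.List.foldl_congr_mem _ _ _ _ ?_
  intro res r hr
  refine PySem.List.foldl_congr_mem _ _ _ _ ?_
  intro acc c hc
  have hrR : r < (a :: t).length := List.mem_range.mp hr
  have hcC : c < a.length := List.mem_range.mp hc
  have h1 : ((0 : Int) + (c : Int)).toNat = c := by omega
  have h2 : ((a :: t).length - 1 - ((0 : Int) + (r : Int))).toNat
      = (a :: t).length - 1 - r := by omega
  have h3 : PySem.List.pyGetD acc ((0 : Int) + (c : Int)) [] = acc.getD c [] := by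
    rw [show ((0 : Int) + (c : Int)) = ((c : Nat) : Int) by omega, PySem.List.pyGetD_natCast]
  have h4 : PySem.List.pyGetD (a :: t) ((0 : Int) + (r : Int)) [] = (a :: t).getD r [] := by
    rw [show ((0 : Int) + (r : Int)) = ((r : Nat) : Int) by omega, PySem.List.pyGetD_natCast]
  have h5 : PySem.List.pyGetD ((a :: t).getD r []) ((0 : Int) + (c : Int)) 0
      = ((a :: t).getD r []).getD c 0 := by
    rw [show ((0 : Int) + (c : Int)) = ((c : Nat) : Int) by omega, PySem.List.pyGetD_natCast]
  rw [h1, h2, h3, h4, h5]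

-- port A's matrix in closed form
lemma portA_eq (a : List Int) (t : List (List Int)) (ha : a ≠ []) :
    rotate_90_cw (a :: t) =
      (List.range a.length).map (fun c =>
        (List.range (a :: t).length).map (fun j =>
          (((a :: t).getD ((a :: t).length - 1 - j) []).getD c 0))) := by
  rw [portA_nat a t ha]
  apply List.ext_getElem?
  intro k
  rw [outer_get (fun r c => ((a :: t).getD r []).getD c 0)
    (fun r => (a :: t).length - 1 - r) a.length _ (a :: t).length k]
  by_cases hk : k < a.length
  · rw [if_pos hk, List.getElem?_map, List.getElem?_range hk,
      List.getElem?_replicate, if_pos hk]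
    simp only [Option.map_some]
    rw [row_fold_eq (fun r => ((a :: t).getD r []).getD k 0) (a :: t).length]
  · rw [if_neg hk, List.getElem?_map,
      List.getElem?_eq_none (show (List.range a.length).length ≤ k by simpa using (by omega : a.length ≤ k)),
      List.getElem?_replicate, if_neg hk]
    rfl

-- port A's closed form is exactly colSpec of the reversed grid
lemma portA_eq_colSpec (a : List Int) (t : List (List Int)) (ha : a ≠ []) :
    rotate_90_cw (a :: t) = colSpec (a :: t).reverse a.length := by
  rw [portA_eq a t ha]
  unfold colSpec
  refine List.map_congr_left (fun c _ => ?_)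
  apply List.ext_getElem?
  intro j
  by_cases hj : j < (a :: t).length
  · have hjr : j < (a :: t).reverse.length := by simpa using hj
    rw [List.getElem?_map, List.getElem?_range hj, List.getElem?_map,
      List.getElem?_eq_getElem hjr]
    simp only [Option.map_some]
    rw [List.getElem_reverse]
    have hlt : (a :: t).length - 1 - j < (a :: t).length := by omega
    rw [List.getD_eq_getElem _ _ hlt]
  · rw [List.getElem?_map,
      List.getElem?_eq_none (show (List.range (a :: t).length).length ≤ j by simpa using (by omega : (a :: t).length ≤ j)),
      List.getElem?_map,
      List.getElem?_eq_none (show (a :: t).reverse.length ≤ j by simpa using (by omega : (a :: t).length ≤ j))]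
    rfl

-- ===== VERDICT (by name: the statement is the Claim_ definition above) =====
theorem rotate_90_cw_spec : Claim_equal_rotate_90_cw := by
  intro grid _ hpre
  unfold Spec_rotate_90_cw
  match grid with
  | [] => rfl
  | a :: t =>
    by_cases ha : a = []
    · subst ha
      have hget0 : PySem.List.pyGetD (([] : List Int) :: t) 0 [] = ([] : List Int) := by
        simp [PySem.List.pyGetD, PySem.List.pyGet?, PySem.List.pyIdx?]
      rw [rotate_90_cw, if_pos (Or.inr hget0), rotate_90_cw_alt, if_pos (Or.inr hget0)]
    · have hget0 : PySem.List.pyGetD (a :: t) 0 [] = a := by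
        simp [PySem.List.pyGetD, PySem.List.pyGet?, PySem.List.pyIdx?]
      rw [rotate_90_cw_alt, if_neg (by simp [hget0, ha])]
      rw [portA_eq_colSpec a t ha]
      have hhead : ((a :: t).headD []) = a := rfl
      rw [pyZipStar_eq (a :: t).reverse a.length (by simp)
        (fun row hrow => by
          have : row ∈ (a :: t) := List.mem_reverse.mp hrow
          simpa [hhead] using hpre row this)
        ⟨a, List.mem_reverse.mpr (by simp), rfl⟩]
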